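-- pv_equiv track=rewrite | github.com/hirosuzuki/procon | atcoder/abc/agc004_b.py | solve
-- ===== SOURCE A (Python) =====
-- def solve(N, X, A):
--     M = A[:]
--     result = sum(M)
--     for i in range(1, N):
--         M = [min(M[j], A[(j-i)%N]) for j in range(N)]
--         r = sum(M) + X * i
--         result = min(result, r)
--     return result
-- ===== SOURCE B (Python) =====
-- def solve(N, X, A):
--     # Sparse-table RMQ: T[p][j] = min of A[(j-t) % N] for t in range(1 << p);
--     # each circular window minimum of length L is then min of two power-of-two
--     # blocks, instead of A's N incremental rebuilds of a running min-array.
--     T = [A[:]]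
--     p = 1
--     while (1 << p) <= N:
--         prev = T[-1]
--         half = 1 << (p - 1)
--         T.append([min(prev[j], prev[(j - half) % N]) for j in range(N)])
--         p += 1
--     best = sum(A)
--     for k in range(1, N):
--         L = k + 1
--         p = L.bit_length() - 1
--         row = T[p]
--         off = L - (1 << p)
--         s = sum(min(row[j], row[(j - off) % N]) for j in range(N))
--         best = min(best, s + X * k)
--     return best
-- ===== Notes on version B (the rewrite author's own statement) =====
-- stated objective: alternative
-- what changed: B replaces A's N incremental rebuilds of a running min-array by a sparse table of power-of-two circular window minima (binary doubling), answering each window-minimum by combining two overlapping power-of-two blocks.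
import Mathlib
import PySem

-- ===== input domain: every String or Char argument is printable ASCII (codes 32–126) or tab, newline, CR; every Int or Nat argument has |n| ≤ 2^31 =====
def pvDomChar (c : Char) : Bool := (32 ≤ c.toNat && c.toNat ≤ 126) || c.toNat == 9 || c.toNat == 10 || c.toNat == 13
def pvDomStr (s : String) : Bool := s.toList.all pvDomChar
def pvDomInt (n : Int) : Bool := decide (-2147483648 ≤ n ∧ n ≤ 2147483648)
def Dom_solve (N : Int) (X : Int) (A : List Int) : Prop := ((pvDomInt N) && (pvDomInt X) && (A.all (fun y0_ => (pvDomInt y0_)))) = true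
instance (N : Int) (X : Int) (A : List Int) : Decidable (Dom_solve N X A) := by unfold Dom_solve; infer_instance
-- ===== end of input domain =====

-- B replaces A's N incremental rebuilds of a running min-array by a sparse table of
-- power-of-two circular window minima (binary doubling); alternative algorithm, same O(N^2).

-- ===== PORT A =====
def solve (N : Int) (X : Int) (A : List Int) : Int :=
  -- M = A[:]; result = sum(M)
  -- for i in range(1, N): M = [min(M[j], A[(j-i)%N]) for j in range(N)]; result = min(result, sum(M)+X*i)
  let st := (PySem.List.pyRange 1 N 1).foldl
    (fun (st : List Int × Int) i =>
      let M := (PySem.List.pyRange 0 N 1).map (fun j =>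
        min (PySem.List.pyGetD st.1 j 0)
            (PySem.List.pyGetD A (PySem.Int.mod (j - i) N) 0))
      (M, min st.2 (M.sum + X * i)))
    (A, A.sum)
  st.2

-- ===== PORT B =====
-- the while loop building the sparse table rows p = 1, 2, … while 2^p ≤ N
-- (fuel only makes the recursion total; it never runs out for fuel = N.toNat)
def solveBuild (A : List Int) (N : Int) : Nat → List Int → Nat → List (List Int)
  | 0, _, _ => []
  | fuel + 1, prev, p =>
    if (2 : Int) ^ p ≤ N then
      let half : Int := 2 ^ (p - 1)
      let row := (PySem.List.pyRange 0 N 1).map (fun j =>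
        min (PySem.List.pyGetD prev j 0)
            (PySem.List.pyGetD prev (PySem.Int.mod (j - half) N) 0))
      row :: solveBuild A N fuel row (p + 1)
    else []

def solve_alt (N : Int) (X : Int) (A : List Int) : Int :=
  -- T = [A[:]]; p = 1; while (1<<p) <= N: append doubled row
  let T := A :: solveBuild A N N.toNat A 1
  -- best = sum(A); for k in range(1, N): combine two power-of-two blocks per position
  (PySem.List.pyRange 1 N 1).foldl
    (fun best k =>
      let L := k + 1
      let p := Nat.log2 L.toNat          -- L.bit_length() - 1
      let row := T.getD p []
      let off := L - (2 : Int) ^ p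
      let s := ((PySem.List.pyRange 0 N 1).map (fun j =>
        min (PySem.List.pyGetD row j 0)
            (PySem.List.pyGetD row (PySem.Int.mod (j - off) N) 0))).sum
      min best (s + X * k))
    A.sum

-- ===== PRECONDITION & SPEC =====
-- Pre_ excludes N ≥ 2 with N > len(A): there the Python A always raises IndexError
-- (it reads A[(j-i)%N] for every residue mod N, some of which is out of range).
def Pre_solve (N : Int) (X : Int) (A : List Int) : Prop := N ≤ (A.length : Int) ∨ N ≤ 1
instance (N : Int) (X : Int) (A : List Int) : Decidable (Pre_solve N X A) := by
  unfold Pre_solve; infer_instance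
def pvWitness_solve : Int × Int × List Int := (3, 2, [5, -1, 4])

def Spec_solve (N : Int) (X : Int) (A : List Int) (out : Int) : Prop := out = solve_alt N X A
instance (N : Int) (X : Int) (A : List Int) (out : Int) : Decidable (Spec_solve N X A out) := by
  unfold Spec_solve; infer_instance

-- ===== CLAIM (what is proved, stated in full; the proofs are below) =====
def Claim_equal_solve : Prop := ∀ (N : Int) (X : Int) (A : List Int),
  Dom_solve N X A → Pre_solve N X A → Spec_solve N X A (solve N X A)

-- ===== LEMMAS AND PROOFS =====

-- a_((j-i) mod n): the circular element both programs read (modulus n = the Python N)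
def gIdx (A : List Int) (n : Nat) (j i : Int) : Int :=
  PySem.List.pyGetD A (PySem.Int.mod (j - i) (n : Int)) 0

-- W a j = min over t = 0..a of a_((j-t) mod n): the window minimum of length a+1 ending at j
def W (A : List Int) (n : Nat) : Nat → Int → Int
  | 0, j => gIdx A n j 0
  | a + 1, j => min (W A n a j) (gIdx A n j ((a : Int) + 1))

-- column sums over j < J of W k j
def colSum (A : List Int) (n : Nat) (k : Nat) (J : Nat) : Int :=
  ((List.range J).map (fun j => W A n k (Int.ofNat j))).sum

-- A's running result after i iterations
def Rres (A : List Int) (n : Nat) (X : Int) : Nat → Int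
  | 0 => A.sum
  | i + 1 => min (Rres A n X i) (colSum A n (i + 1) n + X * ((i : Int) + 1))

-- A's min-array after i iterations: the original list at i = 0, W-arrays afterwards
def Mfst (A : List Int) (n : Nat) : Nat → List Int
  | 0 => A
  | i + 1 => (PySem.List.pyRange 0 (n : Int) 1).map (fun j => W A n (i + 1) j)

-- Rm j d a = min over t = 0..a of a_((j-(d+t)) mod n): a window starting at offset d
def Rm (A : List Int) (n : Nat) (j d : Int) : Nat → Int
  | 0 => gIdx A n j d
  | a + 1 => min (Rm A n j d a) (gIdx A n j (d + (a : Int) + 1))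

-- row p of the sparse table
def rowW (A : List Int) (n : Nat) (q : Nat) : List Int :=
  (PySem.List.pyRange 0 (n : Int) 1).map (fun j => W A n (2 ^ q - 1) j)

theorem gIdx_zero (A : List Int) (n : Nat) (j : Int) (h0 : 0 ≤ j) (hj : j < (n : Int)) :
    gIdx A n j 0 = PySem.List.pyGetD A j 0 := by
  unfold gIdx
  rw [PySem.Int.mod_eq_emod_of_pos (by omega)]
  rw [Int.emod_eq_of_lt (by omega) (by omega)]
  rw [sub_zero]

theorem pyRangeN_map (n : Nat) (f : Int → Int) :
    (PySem.List.pyRange 0 (n : Int) 1).map f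
      = (List.range n).map (fun j => f (Int.ofNat j)) := by
  rw [PySem.List.pyRange_zero_nat, List.map_map]; simp

theorem Mfst_get (A : List Int) (n : Nat) (i : Nat) (j : Int)
    (h0 : 0 ≤ j) (hj : j < (n : Int)) :
    PySem.List.pyGetD (Mfst A n i) j 0 = W A n i j := by
  cases i with
  | zero =>
    show PySem.List.pyGetD A j 0 = W A n 0 j
    rw [show W A n 0 j = gIdx A n j 0 from rfl, gIdx_zero A n j h0 hj]
  | succ i =>
    show PySem.List.pyGetD ((PySem.List.pyRange 0 (n : Int) 1).map _) j 0 = _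
    rw [PySem.List.pyGetD_map_pyRange_of_nonneg _ _ _ _ h0 hj]

-- the A-side fold computes (min array, running result)
theorem foldA (A : List Int) (X : Int) (n : Nat) (i : Nat) :
    (PySem.List.pyRange 1 ((i : Int) + 1) 1).foldl
      (fun (st : List Int × Int) i =>
        let M := (PySem.List.pyRange 0 (n : Int) 1).map (fun j =>
          min (PySem.List.pyGetD st.1 j 0)
              (PySem.List.pyGetD A (PySem.Int.mod (j - i) (n : Int)) 0))
        (M, min st.2 (M.sum + X * i)))
      (A, A.sum)
    = (Mfst A n i, Rres A n X i) := by
  induction i with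
  | zero =>
    rw [show ((0 : Nat) : Int) + 1 = 1 by norm_num,
        PySem.List.pyRange_one_eq_nil (le_refl (1 : Int)), List.foldl_nil]
    rfl
  | succ i ih =>
    rw [show (((i + 1 : Nat)) : Int) + 1 = ((i : Int) + 1) + 1 by push_cast; ring,
        PySem.List.pyRange_one_succ_right (by omega : (1 : Int) ≤ (i : Int) + 1),
        List.foldl_append, ih, List.foldl_cons, List.foldl_nil]
    have hM : (PySem.List.pyRange 0 (n : Int) 1).map (fun j =>
        min (PySem.List.pyGetD (Mfst A n i) j 0)
            (PySem.List.pyGetD A (PySem.Int.mod (j - ((i : Int) + 1)) (n : Int)) 0))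
        = (PySem.List.pyRange 0 (n : Int) 1).map (fun j => W A n (i + 1) j) := by
      apply List.map_congr_left
      intro j hj
      rw [PySem.List.mem_pyRange_one] at hj
      rw [Mfst_get A n i j hj.1 hj.2]
      rfl
    simp only [hM]
    refine Prod.ext rfl ?_
    show min (Rres A n X i) (_ + X * ((i : Int) + 1)) = Rres A n X (i + 1)
    rw [pyRangeN_map]
    rfl

-- B-side lemmas -------------------------------------------------------------

-- reading the circular element is invariant under reducing the position mod n
theorem gIdx_mod (A : List Int) (n : Nat) (hn : 0 < n) (j i : Int) :
    gIdx A n (PySem.Int.mod j (n : Int)) i = gIdx A n j i := by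
  unfold gIdx
  rw [PySem.Int.mod_eq_emod_of_pos (by exact_mod_cast hn),
      PySem.Int.mod_eq_emod_of_pos (by exact_mod_cast hn),
      PySem.Int.mod_eq_emod_of_pos (by exact_mod_cast hn)]
  congr 1
  conv_lhs => rw [Int.sub_emod]
  conv_rhs => rw [Int.sub_emod]
  rw [Int.emod_emod_of_dvd _ (dvd_refl _)]

theorem W_mod (A : List Int) (n : Nat) (hn : 0 < n) (a : Nat) (j : Int) :
    W A n a (PySem.Int.mod j (n : Int)) = W A n a j := by
  induction a with
  | zero => exact gIdx_mod A n hn j 0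
  | succ a ih => show min _ _ = min _ _; rw [ih, gIdx_mod A n hn]

theorem W_shift (A : List Int) (n : Nat) (j d : Int) (a : Nat) :
    W A n a (j - d) = Rm A n j d a := by
  induction a with
  | zero =>
    show gIdx A n (j - d) 0 = gIdx A n j d
    unfold gIdx; congr 2; ring
  | succ a ih =>
    show min (W A n a (j - d)) (gIdx A n (j - d) ((a : Int) + 1)) = min (Rm A n j d a) _
    rw [ih]
    congr 1
    unfold gIdx; congr 2; ring

theorem Rm_rotate (A : List Int) (n : Nat) (j d : Int) (a : Nat) :
    min (Rm A n j d a) (gIdx A n j (d + (a : Int) + 1))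
      = min (gIdx A n j d) (Rm A n j (d + 1) a) := by
  induction a with
  | zero =>
    show min (gIdx A n j d) (gIdx A n j (d + (0 : Int) + 1))
        = min (gIdx A n j d) (gIdx A n j (d + 1))
    norm_num
  | succ a ih =>
    show min (min (Rm A n j d a) (gIdx A n j (d + (a : Int) + 1)))
          (gIdx A n j (d + ((a : Int) + 1) + 1))
        = min (gIdx A n j d)
          (min (Rm A n j (d + 1) a) (gIdx A n j ((d + 1) + (a : Int) + 1)))
    rw [ih, min_assoc]
    congr 2
    ring_nf

theorem W_absorb (A : List Int) (n : Nat) (j : Int) (a d : Nat) (hd : d ≤ a) :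
    min (W A n a j) (gIdx A n j (d : Int)) = W A n a j := by
  induction a with
  | zero =>
    have : d = 0 := by omega
    subst this
    show min (gIdx A n j 0) (gIdx A n j ((0 : Nat) : Int)) = gIdx A n j 0
    norm_num
  | succ a ih =>
    by_cases hda : d = a + 1
    · subst hda
      show min (min (W A n a j) (gIdx A n j ((a : Int) + 1))) (gIdx A n j _) = _
      rw [min_assoc]
      congr 1
      rw [show (((a + 1 : Nat)) : Int) = (a : Int) + 1 by push_cast; ring, min_self]
    · have hda' : d ≤ a := by omega
      show min (min (W A n a j) (gIdx A n j ((a : Int) + 1))) (gIdx A n j (d : Int)) = _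
      rw [min_right_comm, ih hda']
      rfl

-- the key merge: two overlapping windows of length a+1 make a window of length a+d+1
theorem W_merge (A : List Int) (n : Nat) (j : Int) (a d : Nat) (hd : d ≤ a + 1) :
    min (W A n a j) (W A n a (j - (d : Int))) = W A n (a + d) j := by
  induction d with
  | zero =>
    rw [show ((0 : Nat) : Int) = 0 by norm_num, sub_zero, min_self]
    rfl
  | succ d ih =>
    have hd' : d ≤ a := by omega
    have step : W A n (a + (d + 1)) j
        = min (min (W A n a j) (W A n a (j - (d : Int)))) (gIdx A n j ((a : Int) + d + 1)) := by
      show min (W A n (a + d) j) (gIdx A n j (((a + d : Nat) : Int) + 1)) = _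
      rw [ih (by omega), show ((a + d : Nat) : Int) + 1 = (a : Int) + d + 1 by push_cast; ring]
    rw [step, min_assoc, W_shift A n j (d : Int) a,
        show (a : Int) + d + 1 = (d : Int) + (a : Int) + 1 by ring,
        Rm_rotate A n j (d : Int) a,
        ← min_assoc, W_absorb A n j a d hd',
        show (d : Int) + 1 = (((d + 1 : Nat)) : Int) by push_cast; ring,
        ← W_shift A n j _ a]

-- reading a sparse-table row
theorem rowW_get (A : List Int) (n : Nat) (q : Nat) (j : Int)
    (h0 : 0 ≤ j) (hj : j < (n : Int)) :
    PySem.List.pyGetD (rowW A n q) j 0 = W A n (2 ^ q - 1) j := by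
  unfold rowW
  rw [PySem.List.pyGetD_map_pyRange_of_nonneg _ _ _ _ h0 hj]

-- one doubling step of the build produces the next rowW
theorem build_row (A : List Int) (n : Nat) (hn : 0 < n) (p : Nat) (hp : 1 ≤ p)
    (prev : List Int)
    (hprev : ∀ j : Int, 0 ≤ j → j < (n : Int) →
      PySem.List.pyGetD prev j 0 = W A n (2 ^ (p - 1) - 1) j) :
    (PySem.List.pyRange 0 (n : Int) 1).map (fun j =>
        min (PySem.List.pyGetD prev j 0)
            (PySem.List.pyGetD prev (PySem.Int.mod (j - (2 : Int) ^ (p - 1)) (n : Int)) 0))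
      = rowW A n p := by
  unfold rowW
  apply List.map_congr_left
  intro j hj
  rw [PySem.List.mem_pyRange_one] at hj
  have hm0 : 0 ≤ PySem.Int.mod (j - (2 : Int) ^ (p - 1)) (n : Int) := by
    rw [PySem.Int.mod_eq_emod_of_pos (by exact_mod_cast hn)]
    exact Int.emod_nonneg _ (by exact_mod_cast hn.ne')
  have hmlt : PySem.Int.mod (j - (2 : Int) ^ (p - 1)) (n : Int) < (n : Int) := by
    rw [PySem.Int.mod_eq_emod_of_pos (by exact_mod_cast hn)]
    exact Int.emod_lt_of_pos _ (by exact_mod_cast hn)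
  rw [hprev j hj.1 hj.2, hprev _ hm0 hmlt, W_mod A n hn,
      show (2 : Int) ^ (p - 1) = (((2 ^ (p - 1) : Nat)) : Int) by push_cast; ring,
      W_merge A n j (2 ^ (p - 1) - 1) (2 ^ (p - 1)) (by omega)]
  congr 1
  have h1 : 1 ≤ 2 ^ (p - 1) := Nat.one_le_two_pow
  have : 2 ^ (p - 1) + 2 ^ (p - 1) = 2 ^ p := by
    rw [← two_mul, ← pow_succ']
    congr 1
    omega
  omega

-- the build recursion delivers every row q with 2^q ≤ n
theorem build_getD (A : List Int) (n : Nat) (hn : 0 < n) :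
    ∀ (fuel p : Nat) (prev : List Int), 1 ≤ p →
    (∀ j : Int, 0 ≤ j → j < (n : Int) →
      PySem.List.pyGetD prev j 0 = W A n (2 ^ (p - 1) - 1) j) →
    ((n : Int) < (2 : Int) ^ (p + fuel)) →
    ∀ q : Nat, p ≤ q → (2 : Int) ^ q ≤ (n : Int) →
    (solveBuild A (n : Int) fuel prev p).getD (q - p) [] = rowW A n q := by
  intro fuel
  induction fuel with
  | zero =>
    intro p prev hp hprev hfuel q hpq hq
    exfalso
    rw [Nat.add_zero] at hfuel
    have h2 : (2 : Int) ^ p ≤ (2 : Int) ^ q := pow_le_pow_right₀ (by norm_num) hpq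
    omega
  | succ fuel ih =>
    intro p prev hp hprev hfuel q hpq hq
    have hcond : (2 : Int) ^ p ≤ (n : Int) :=
      le_trans (pow_le_pow_right₀ (by norm_num) hpq) hq
    show (solveBuild A (n : Int) (fuel + 1) prev p).getD (q - p) [] = rowW A n q
    rw [solveBuild, if_pos hcond]
    have hrow := build_row A n hn p hp prev hprev
    by_cases hqp : q = p
    · subst hqp
      simp only [Nat.sub_self, List.getD]
      simpa using hrow

    · have hq1 : p + 1 ≤ q := by omega
      have : q - p = (q - (p + 1)) + 1 := by omega
      rw [this]
      show (solveBuild A (n : Int) fuel _ (p + 1)).getD (q - (p + 1)) [] = rowW A n q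
      apply ih (p + 1) _ (by omega) _ (by rw [show p + 1 + fuel = p + (fuel + 1) by omega]; exact hfuel) q hq1 hq
      intro j h0 hj
      rw [hrow, rowW_get A n p j h0 hj, Nat.add_sub_cancel]

-- reading T = A :: build …
theorem table_getD (A : List Int) (n : Nat) (hn : 0 < n) (q : Nat) (hq1 : 1 ≤ q)
    (hq : (2 : Int) ^ q ≤ (n : Int)) :
    (A :: solveBuild A (n : Int) ((n : Int)).toNat A 1).getD q [] = rowW A n q := by
  have : (A :: solveBuild A (n : Int) ((n : Int)).toNat A 1).getD q []
      = (solveBuild A (n : Int) ((n : Int)).toNat A 1).getD (q - 1) [] := by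
    cases q with
    | zero => omega
    | succ q => simp [List.getD]
  rw [this]
  apply build_getD A n hn _ 1 A (le_refl 1) _ _ q hq1 hq
  · intro j h0 hj
    rw [show (2 : Nat) ^ (1 - 1) - 1 = 0 by norm_num]
    show PySem.List.pyGetD A j 0 = gIdx A n j 0
    exact (gIdx_zero A n j h0 hj).symm
  · have h1 : (n : Int).toNat = n := by omega
    rw [h1]
    have h2 : n < 2 ^ (1 + n) := by
      calc n < 2 ^ n := Nat.lt_two_pow_self
        _ ≤ 2 ^ (1 + n) := Nat.pow_le_pow_right (by norm_num) (by omega)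
    exact_mod_cast h2

-- the per-k sum in B equals colSum
theorem query_sum (A : List Int) (n : Nat) (hn2 : 2 ≤ n) (k : Int)
    (hk1 : 1 ≤ k) (hkn : k < (n : Int)) :
    ((PySem.List.pyRange 0 (n : Int) 1).map (fun j =>
        min (PySem.List.pyGetD
              ((A :: solveBuild A (n : Int) ((n : Int)).toNat A 1).getD (Nat.log2 (k + 1).toNat) [])
              j 0)
            (PySem.List.pyGetD
              ((A :: solveBuild A (n : Int) ((n : Int)).toNat A 1).getD (Nat.log2 (k + 1).toNat) [])
              (PySem.Int.mod (j - (k + 1 - (2 : Int) ^ (Nat.log2 (k + 1).toNat))) (n : Int)) 0))).sum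
      = colSum A n k.toNat n := by
  have hn : 0 < n := by omega
  set L : Nat := (k + 1).toNat with hL
  have hL2 : 2 ≤ L := by omega
  set p : Nat := Nat.log2 L with hp
  have hlog : p = Nat.log 2 L := Nat.log2_eq_log_two
  have hpow_le : 2 ^ p ≤ L := by
    rw [hlog]; exact Nat.pow_log_le_self 2 (by omega)
  have hlt : L < 2 ^ (p + 1) := by
    rw [hlog]; exact Nat.lt_pow_succ_log_self (by norm_num) L
  have hp1 : 1 ≤ p := by
    rw [hlog]
    exact (Nat.one_le_iff_ne_zero.mpr (by
      intro h
      have := Nat.log_eq_zero_iff.mp h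
      omega))
  have hpowle_n : (2 : Int) ^ p ≤ (n : Int) := by
    have : (2 : Nat) ^ p ≤ n := by omega
    exact_mod_cast this
  have hrow := table_getD A n hn p hp1 hpowle_n
  rw [hrow]
  -- off as a Nat
  set d : Nat := L - 2 ^ p with hd
  have hoff : k + 1 - (2 : Int) ^ p = (d : Int) := by
    have h2 : ((2 : Nat) ^ p : Int) = (2 : Int) ^ p := by push_cast; ring
    omega
  rw [hoff, pyRangeN_map]
  unfold colSum
  apply congrArg
  apply List.map_congr_left
  intro j hj
  rw [List.mem_range] at hj
  have h0 : (0 : Int) ≤ Int.ofNat j := by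
    simp only [Int.ofNat_eq_natCast]; exact Int.natCast_nonneg j
  have hjn : Int.ofNat j < (n : Int) := by
    simp only [Int.ofNat_eq_natCast]; exact_mod_cast hj
  have hm0 : 0 ≤ PySem.Int.mod (Int.ofNat j - (d : Int)) (n : Int) := by
    rw [PySem.Int.mod_eq_emod_of_pos (by exact_mod_cast hn)]
    exact Int.emod_nonneg _ (by exact_mod_cast hn.ne')
  have hmlt : PySem.Int.mod (Int.ofNat j - (d : Int)) (n : Int) < (n : Int) := by
    rw [PySem.Int.mod_eq_emod_of_pos (by exact_mod_cast hn)]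
    exact Int.emod_lt_of_pos _ (by exact_mod_cast hn)
  rw [rowW_get A n p _ h0 hjn, rowW_get A n p _ hm0 hmlt, W_mod A n hn,
      W_merge A n (Int.ofNat j) (2 ^ p - 1) d (by
        have h1 : 1 ≤ 2 ^ p := Nat.one_le_two_pow
        have : 2 ^ (p + 1) = 2 ^ p + 2 ^ p := by rw [pow_succ]; ring
        omega)]
  congr 1
  have h1 : 1 ≤ 2 ^ p := Nat.one_le_two_pow
  omega

-- B's fold over k = 1..i computes A's running-result recursion
theorem foldB (A : List Int) (X : Int) (n : Nat) (hn2 : 2 ≤ n) :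
    ∀ i : Nat, i < n →
    (PySem.List.pyRange 1 ((i : Int) + 1) 1).foldl
      (fun best k =>
        min best (((PySem.List.pyRange 0 (n : Int) 1).map (fun j =>
          min (PySem.List.pyGetD
                ((A :: solveBuild A (n : Int) ((n : Int)).toNat A 1).getD (Nat.log2 (k + 1).toNat) [])
                j 0)
              (PySem.List.pyGetD
                ((A :: solveBuild A (n : Int) ((n : Int)).toNat A 1).getD (Nat.log2 (k + 1).toNat) [])
                (PySem.Int.mod (j - (k + 1 - (2 : Int) ^ (Nat.log2 (k + 1).toNat))) (n : Int)) 0))).sum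
          + X * k))
      A.sum
    = Rres A n X i := by
  intro i
  induction i with
  | zero =>
    intro _
    rw [show ((0 : Nat) : Int) + 1 = 1 by norm_num,
        PySem.List.pyRange_one_eq_nil (le_refl (1 : Int)), List.foldl_nil]
    rfl
  | succ i ih =>
    intro hi
    rw [show (((i + 1 : Nat)) : Int) + 1 = ((i : Int) + 1) + 1 by push_cast; ring,
        PySem.List.pyRange_one_succ_right (by omega : (1 : Int) ≤ (i : Int) + 1),
        List.foldl_append, ih (by omega), List.foldl_cons, List.foldl_nil]
    rw [query_sum A n hn2 ((i : Int) + 1) (by omega) (by exact_mod_cast hi)]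
    show min (Rres A n X i) (colSum A n (((i : Int) + 1)).toNat n + X * ((i : Int) + 1))
        = Rres A n X (i + 1)
    rw [show (((i : Int) + 1)).toNat = i + 1 by omega]
    rfl

theorem solve_eq (N X : Int) (A : List Int) :
    solve N X A = solve_alt N X A := by
  unfold solve solve_alt
  rcases (le_or_gt N 1 : N ≤ 1 ∨ N > 1) with hN | hN
  · rw [PySem.List.pyRange_one_eq_nil hN]
    rfl
  · obtain ⟨n, hn⟩ : ∃ n : Nat, N = (n : Int) := ⟨N.toNat, by omega⟩
    subst hn
    have hn2 : 2 ≤ n := by exact_mod_cast hN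
    obtain ⟨m, hm⟩ : ∃ m, n = m + 1 := ⟨n - 1, by omega⟩
    have hAside := foldA A X n m
    rw [show ((m : Int) + 1) = ((n : Nat) : Int) by rw [hm]; push_cast; ring] at hAside
    have hBside := foldB A X n hn2 m (by omega)
    rw [show ((m : Int) + 1) = ((n : Nat) : Int) by rw [hm]; push_cast; ring] at hBside
    simp only [hAside, hBside]

-- ===== VERDICT (by name: the statement is the Claim_ definition above) =====
theorem solve_spec : Claim_equal_solve := by
  intro N X A _ _
  unfold Spec_solve
  exact solve_eq N X A
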